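-- pv_equiv track=rewrite | github.com/GJLoring/CST205_Lab_11_and_12 | cst205_Lab11.py | find_directions_or_nouns
-- ===== SOURCE A (Python) =====
-- directions = [ "left", "right", "forward", "ahead", "back", "up", "down", "north", "south", "east", "west" ]
--
-- items   = ["door", "gun", "safe", "map", "necklace", "key", "secret", "book" ]
--
-- def find_directions_or_nouns(userString):
--     '''
--     Search the user typed command for any word in our subject string list
--     we do not respect SPACES so a substring match will still be a match.
--     Also Note we run until we run out of words to search so if two words in the
--     list match, we return the last match
--     '''
--     item = ""
--     for x in directions:
--         if x in userString:
--             item = x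
--     for x in items:
--         if x in userString:
--             item = x
--     return item
-- ===== SOURCE B (Python) =====
-- directions = [ "left", "right", "forward", "ahead", "back", "up", "down", "north", "south", "east", "west" ]
--
-- items   = ["door", "gun", "safe", "map", "necklace", "key", "secret", "book" ]
--
-- def find_directions_or_nouns(userString):
--     # single reverse scan over directions+items: the first reverse match
--     # is exactly the original's last forward match (items take priority).
--     for word in reversed(directions + items):
--         if word in userString:
--             return word
--     return ""
-- ===== Notes on version B (the rewrite author's own statement) =====
-- stated objective: simpler
-- what changed: Replaces the two accumulator-overwriting loops with a single early-return reverse scan over the concatenated constant list (directions then items), since the first match in reverse order equals the last forward match.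
import Mathlib
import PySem

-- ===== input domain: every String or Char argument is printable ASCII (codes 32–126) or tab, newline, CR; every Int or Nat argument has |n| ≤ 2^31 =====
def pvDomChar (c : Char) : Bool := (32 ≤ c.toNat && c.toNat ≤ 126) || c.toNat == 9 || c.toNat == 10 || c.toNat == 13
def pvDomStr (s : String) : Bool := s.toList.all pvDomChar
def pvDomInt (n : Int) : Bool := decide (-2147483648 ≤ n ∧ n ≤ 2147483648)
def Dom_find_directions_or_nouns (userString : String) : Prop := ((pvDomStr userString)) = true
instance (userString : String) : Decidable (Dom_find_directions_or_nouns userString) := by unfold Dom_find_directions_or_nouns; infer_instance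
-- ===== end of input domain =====

-- B replaces A's two accumulator-overwriting loops by a single early-return
-- reverse scan over the concatenated constant list (objective: simpler).

def pvDirections : List String :=
  ["left", "right", "forward", "ahead", "back", "up", "down", "north", "south", "east", "west"]

def pvItems : List String :=
  ["door", "gun", "safe", "map", "necklace", "key", "secret", "book"]

-- ===== PORT A =====
def find_directions_or_nouns (userString : String) : String :=
  let item := pvDirections.foldl (fun acc x => if PySem.Str.isIn x userString then x else acc) ""
  pvItems.foldl (fun acc x => if PySem.Str.isIn x userString then x else acc) item

-- ===== PORT B =====
-- 'for word in reversed(directions + items): if word in userString: return word' / 'return ""'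
def find_directions_or_nouns_alt (userString : String) : String :=
  match (pvDirections ++ pvItems).reverse.find? (fun word => PySem.Str.isIn word userString) with
  | some word => word
  | none => ""

-- ===== PRECONDITION & SPEC =====
def Spec_find_directions_or_nouns (userString : String) (out : String) : Prop := out = find_directions_or_nouns_alt userString
instance (userString : String) (out : String) : Decidable (Spec_find_directions_or_nouns userString out) := by unfold Spec_find_directions_or_nouns; infer_instance

-- ===== CLAIM (what is proved, stated in full; the proofs are below) =====
def Claim_equal_find_directions_or_nouns : Prop := ∀ (userString : String), Dom_find_directions_or_nouns userString → Spec_find_directions_or_nouns userString (find_directions_or_nouns userString)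

-- ===== LEMMAS AND PROOFS =====

-- A's overwriting loop computes the last match: i.e. the first match of the reversed list.
theorem foldl_overwrite_eq_find_reverse {α : Type} (p : α → Bool) (l : List α) (init : α) :
    l.foldl (fun acc x => if p x then x else acc) init
      = (l.reverse.find? p).getD init := by
  induction l generalizing init with
  | nil => rfl
  | cons x xs ih =>
      simp only [List.foldl_cons, List.reverse_cons, List.find?_append, ih]
      cases h : xs.reverse.find? p with
      | some w => simp
      | none =>
          simp only [Option.none_or]
          by_cases hp : p x = true <;> simp [List.find?, hp]

theorem find_directions_or_nouns_spec : Claim_equal_find_directions_or_nouns := by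
  intro s _
  unfold Spec_find_directions_or_nouns find_directions_or_nouns find_directions_or_nouns_alt
  rw [foldl_overwrite_eq_find_reverse, foldl_overwrite_eq_find_reverse,
    List.reverse_append, List.find?_append]
  cases h : pvItems.reverse.find? (fun word => PySem.Str.isIn word s) with
  | some w => simp
  | none =>
      simp only [Option.none_or]
      cases pvDirections.reverse.find? (fun word => PySem.Str.isIn word s) <;> rfl
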